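-- pv_equiv track=rewrite | github.com/spire-brian-finn/scratch-pad | ccsds_tc_randomizer/ccsds_tc_randomizer.py | ccsds_tc_randomizer_bits
-- ===== SOURCE A (Python) =====
-- def ccsds_tc_randomizer_bits(n_bits: int):
--     """
--     Generate n_bits of the CCSDS TC randomizer sequence
--     following section 6.2 of https://ccsds.org/Pubs/231x0b4e1.pdf
--     The spec claims the polynomial is
--     h(x) = x^8 + x^6 + x^4 + x^3 + x^2 + x + 1,
--     but the diagram just below it seems to suggest
--     x^7 + x^5 + x^4 + x^3 + x^2 + x
--     and that one matches the 40 bits of the sequence given in the spec,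
--     1111 1111 0011 1001 1001 1110 0101 1010 0110 1000
--     """
--     state = 0xFF  # Initialize to all 1
--     bits = []
--
--     for _ in range(n_bits):
--         out_bit = state & 0x01
--         bits.append(out_bit)
--
--         fb = (
--             ((state >> 6) & 1) ^
--             ((state >> 4) & 1) ^
--             ((state >> 3) & 1) ^
--             ((state >> 2) & 1) ^
--             ((state >> 1) & 1) ^
--             ((state >> 0) & 1)
--         )
--
--         # Shift right, insert feedback into MSB
--         state = ((state >> 1) & 0x7F) | (fb << 7)
--
--     return bits, state
-- ===== SOURCE B (Python) =====
-- def _lfsr_step(state):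
--     fb = (
--         ((state >> 6) & 1) ^
--         ((state >> 4) & 1) ^
--         ((state >> 3) & 1) ^
--         ((state >> 2) & 1) ^
--         ((state >> 1) & 1) ^
--         ((state >> 0) & 1)
--     )
--     return ((state >> 1) & 0x7F) | (fb << 7)
--
--
-- def ccsds_tc_randomizer_bits(n_bits: int):
--     # Precompute one full period of the LFSR (states and output bits),
--     # then materialize the output by modular indexing into the period table.
--     period_states = []
--     period_bits = []
--     state = 0xFF
--     while True:
--         period_states.append(state)
--         period_bits.append(state & 0x01)
--         state = _lfsr_step(state)
--         if state == 0xFF: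
--             break
--     L = len(period_bits)
--     if n_bits <= 0:
--         return [], 0xFF
--     return [period_bits[i % L] for i in range(n_bits)], period_states[n_bits % L]
-- ===== Notes on version B (the rewrite author's own statement) =====
-- stated objective: faster
-- what changed: B computes one full 255-state period of the LFSR once, then produces the output bits by modular indexing into the period table (and the final state by a single table lookup) instead of stepping the register once per output bit.
import Mathlib
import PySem

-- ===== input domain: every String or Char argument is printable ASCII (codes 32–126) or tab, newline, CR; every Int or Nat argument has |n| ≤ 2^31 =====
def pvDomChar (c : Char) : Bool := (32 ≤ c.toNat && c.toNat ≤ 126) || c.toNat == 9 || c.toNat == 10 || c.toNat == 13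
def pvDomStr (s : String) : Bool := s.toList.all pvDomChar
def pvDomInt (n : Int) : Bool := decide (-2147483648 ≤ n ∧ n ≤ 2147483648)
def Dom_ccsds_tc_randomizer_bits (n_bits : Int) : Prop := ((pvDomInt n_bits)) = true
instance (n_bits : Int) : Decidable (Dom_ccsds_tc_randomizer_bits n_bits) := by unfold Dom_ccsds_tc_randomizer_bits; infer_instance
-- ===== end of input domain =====

-- B precomputes one full LFSR period and emits bits by modular table lookup instead of stepping the register per bit.

-- ===== PORT A =====
def ccsds_tc_randomizer_bits (n_bits : Int) : List Int × Int :=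
  (PySem.List.pyRange 0 n_bits 1).foldl
    (fun (acc : List Int × Int) _ =>
      let state := acc.2
      let out_bit := PySem.Int.band state 0x01
      let bits := acc.1 ++ [out_bit]
      let fb := PySem.Int.bxor (PySem.Int.bxor (PySem.Int.bxor (PySem.Int.bxor (PySem.Int.bxor
        (PySem.Int.band (state >>> 6) 1)
        (PySem.Int.band (state >>> 4) 1))
        (PySem.Int.band (state >>> 3) 1))
        (PySem.Int.band (state >>> 2) 1))
        (PySem.Int.band (state >>> 1) 1))
        (PySem.Int.band (state >>> 0) 1)
      (bits, PySem.Int.bor (PySem.Int.band (state >>> 1) 0x7F) (fb <<< 7)))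
    ([], 0xFF)

-- ===== PORT B =====
-- Source B's helper _lfsr_step
def pvLfsrStep (state : Int) : Int :=
  let fb := PySem.Int.bxor (PySem.Int.bxor (PySem.Int.bxor (PySem.Int.bxor (PySem.Int.bxor
    (PySem.Int.band (state >>> 6) 1)
    (PySem.Int.band (state >>> 4) 1))
    (PySem.Int.band (state >>> 3) 1))
    (PySem.Int.band (state >>> 2) 1))
    (PySem.Int.band (state >>> 1) 1))
    (PySem.Int.band (state >>> 0) 1)
  PySem.Int.bor (PySem.Int.band (state >>> 1) 0x7F) (fb <<< 7)

-- Source B's while-loop, made total with fuel (the loop always breaks after 255 iterations, so fuel 300 is never exhausted)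
def pvBuildPeriod (state : Int) (fuel : Nat) : List Int × List Int :=
  let state' := pvLfsrStep state
  match fuel with
  | 0 => ([state], [PySem.Int.band state 0x01])
  | fuel + 1 =>
    if state' = 0xFF then ([state], [PySem.Int.band state 0x01])
    else
      let rest := pvBuildPeriod state' fuel
      (state :: rest.1, PySem.Int.band state 0x01 :: rest.2)

def ccsds_tc_randomizer_bits_alt (n_bits : Int) : List Int × Int :=
  let t := pvBuildPeriod 0xFF 300
  let period_states := t.1
  let period_bits := t.2
  let L : Int := period_bits.length
  if n_bits ≤ 0 then ([], 0xFF)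
  else
    -- list indices i % L and n_bits % L are always in range, so pyGetD's default is never used
    ((PySem.List.pyRange 0 n_bits 1).map
       (fun i => PySem.List.pyGetD period_bits (PySem.Int.mod i L) 0),
     PySem.List.pyGetD period_states (PySem.Int.mod n_bits L) 0)

-- ===== PRECONDITION & SPEC =====
def Spec_ccsds_tc_randomizer_bits (n_bits : Int) (out : List Int × Int) : Prop := out = ccsds_tc_randomizer_bits_alt n_bits
instance (n_bits : Int) (out : List Int × Int) : Decidable (Spec_ccsds_tc_randomizer_bits n_bits out) := by unfold Spec_ccsds_tc_randomizer_bits; infer_instance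

-- ===== CLAIM (what is proved, stated in full; the proofs are below) =====
def Claim_equal_ccsds_tc_randomizer_bits : Prop := ∀ (n_bits : Int), Dom_ccsds_tc_randomizer_bits n_bits → Spec_ccsds_tc_randomizer_bits n_bits (ccsds_tc_randomizer_bits n_bits)

-- ===== LEMMAS AND PROOFS =====

-- state of the LFSR after k steps from the initial state
def pvIter (k : Nat) : Int := pvLfsrStep^[k] 0xFF

set_option maxRecDepth 8000 in
lemma pvA_char (n : Nat) :
    ccsds_tc_randomizer_bits (n : Int) =
      ((List.range n).map (fun i => PySem.Int.band (pvIter i) 0x01), pvIter n) := by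
  induction n with
  | zero =>
    unfold ccsds_tc_randomizer_bits
    rw [PySem.List.pyRange_one_eq_nil (by omega)]
    rfl
  | succ n ih =>
    unfold ccsds_tc_randomizer_bits at *
    rw [show ((n + 1 : Nat) : Int) = (n : Int) + 1 by push_cast; ring,
        PySem.List.pyRange_one_succ_right (by positivity),
        List.foldl_append, ih, List.range_succ, List.map_append]
    simp [pvIter, Function.iterate_succ_apply', pvLfsrStep]

-- the state trace, as B's loop records it
def pvStates (n : Nat) (s : Int) : List Int :=
  match n with
  | 0 => []
  | n + 1 => s :: pvStates n (pvLfsrStep s)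

lemma pvStates_eq (n : Nat) (s : Int) :
    pvStates n s = (List.range n).map (fun k => pvLfsrStep^[k] s) := by
  induction n generalizing s with
  | zero => rfl
  | succ n ih =>
    rw [show pvStates (n + 1) s = s :: pvStates n (pvLfsrStep s) from rfl, ih,
        List.range_succ_eq_map, List.map_cons, List.map_map]
    refine congrArg₂ _ rfl (List.map_congr_left ?_)
    intro k _
    simp [Function.comp, Function.iterate_succ_apply]

set_option maxRecDepth 100000 in
set_option maxHeartbeats 4000000 in
lemma pvPeriod_raw :
    pvBuildPeriod 0xFF 300 =
      (pvStates 255 0xFF, (pvStates 255 0xFF).map (fun s => PySem.Int.band s 0x01)) := by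
  decide

lemma pvPeriod_eq :
    pvBuildPeriod 0xFF 300 =
      ((List.range 255).map (fun k => pvIter k),
       (List.range 255).map (fun k => PySem.Int.band (pvIter k) 0x01)) := by
  rw [pvPeriod_raw, pvStates_eq, List.map_map]
  rfl

set_option maxRecDepth 100000 in
set_option maxHeartbeats 1000000 in
lemma pvIter_255 : pvLfsrStep^[255] 0xFF = 0xFF := by decide

set_option maxRecDepth 100000 in
lemma pvIter_mod (k : Nat) : pvIter k = pvIter (k % 255) := by
  induction k using Nat.strong_induction_on with
  | _ k ih =>
    by_cases h : k < 255
    · rw [Nat.mod_eq_of_lt h]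
    · have hk : k = (k - 255) + 255 := by omega
      have hiter : pvIter k = pvIter (k - 255) := by
        unfold pvIter
        conv_lhs => rw [hk]
        rw [Function.iterate_add_apply, pvIter_255]
      rw [hiter, ih (k - 255) (by omega)]
      congr 1; omega

lemma pvTable_lookup (f : Nat → Int) (k : Nat) (hk : k < 255) :
    PySem.List.pyGetD ((List.range 255).map f) ((k : Nat) : Int) 0 = f k := by
  rw [PySem.List.pyGetD_natCast, List.getD_eq_getElem?_getD, List.getElem?_map,
      List.getElem?_range hk]
  rfl

lemma pvB_char (n : Nat) (hn : 0 < n) :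
    ccsds_tc_randomizer_bits_alt (n : Int) =
      ((List.range n).map (fun i => PySem.Int.band (pvIter i) 0x01), pvIter n) := by
  unfold ccsds_tc_randomizer_bits_alt
  rw [pvPeriod_eq]
  have hL : (((List.range 255).map (fun k => PySem.Int.band (pvIter k) 0x01)).length : Int) = (255 : Int) := by
    simp
  simp only [hL]
  rw [if_neg (by omega : ¬ ((n : Int) ≤ 0))]
  refine Prod.ext ?_ ?_
  · show (PySem.List.pyRange 0 (n : Int) 1).map _ = _
    rw [PySem.List.pyRange_zero_nat, List.map_map]
    refine List.map_congr_left ?_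
    intro k _
    show PySem.List.pyGetD _ (PySem.Int.mod ((k : Nat) : Int) 255) 0 = _
    rw [show (255 : Int) = ((255 : Nat) : Int) from rfl, PySem.Int.mod_natCast,
        pvTable_lookup _ _ (Nat.mod_lt k (by norm_num)), ← pvIter_mod]
  · show PySem.List.pyGetD _ (PySem.Int.mod ((n : Nat) : Int) 255) 0 = _
    rw [show (255 : Int) = ((255 : Nat) : Int) from rfl, PySem.Int.mod_natCast,
        pvTable_lookup _ _ (Nat.mod_lt n (by norm_num)), ← pvIter_mod]

-- ===== VERDICT (by name: the statement is the Claim_ definition above) =====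
theorem ccsds_tc_randomizer_bits_spec : Claim_equal_ccsds_tc_randomizer_bits := by
  intro n _
  unfold Spec_ccsds_tc_randomizer_bits
  by_cases h : n ≤ 0
  · have hA : ccsds_tc_randomizer_bits n = ([], 0xFF) := by
      unfold ccsds_tc_randomizer_bits
      rw [PySem.List.pyRange_one_eq_nil h]
      rfl
    have hB : ccsds_tc_randomizer_bits_alt n = ([], 0xFF) := by
      unfold ccsds_tc_randomizer_bits_alt
      rw [if_pos h]
    rw [hA, hB]
  · have hn : n = ((n.toNat : Nat) : Int) := by omega
    rw [hn, pvA_char, pvB_char _ (by omega)]
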